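-- pv_equiv track=rewrite | github.com/hmarko89/elte-oszm | mip/machine_scheduling.py | __separation_algorithm
-- ===== SOURCE A (Python) =====
-- def __separation_algorithm( p:list[int], C:list[int] ):
--     """
--     Separation algorithm.
--
--     Queyranne, M. (1993). Structure of a simple scheduling polyhedron. Mathematical Programming, 58(1), 263-285.
--
--     Args:
--         - p: list of processing times
--         - C: list of completion times (from LP-relaxation)
--
--     Returns:
--         - best_set: a subset that maximizes the submodular function, or None, if the maximum is 0
--     """
--     best_set   = None
--     best_value = 0
--     curr_set   = []
--     curr_value = 0
--     delta      = 0
--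
--     for j in sorted( range(len(p)), key= lambda i : C[i] ):
--         curr_set.append(j)
--         delta += p[j]
--         curr_value += p[j]*(delta-C[j])
--
--         if best_value < curr_value:
--             best_value = curr_value
--             best_set   = curr_set[:] # copy!
--
--     return best_set
-- ===== SOURCE B (Python) =====
-- def __separation_algorithm(p: list[int], C: list[int]):
--     """Closed-form rewrite: for the prefix ending at position k of the C-sorted order,
--     twice the submodular value equals P*P + Q - 2*R where P, Q, R are the prefix sums of
--     p[j], p[j]**2 and p[j]*C[j] (since sum_j p[j]*delta[j] = (P**2 + sum p[j]**2)/2).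
--     Working with the doubled value keeps everything in integers; the argmax and the
--     sign test are unaffected.  The first argmax is found by a right-to-left scan."""
--     order = sorted(range(len(p)), key=lambda i: C[i])
--     P = 0
--     Q = 0
--     R = 0
--     vals2 = []
--     for j in order:
--         P += p[j]
--         Q += p[j] * p[j]
--         R += p[j] * C[j]
--         vals2.append(P * P + Q - 2 * R)
--     best = None
--     for kv in reversed(list(enumerate(vals2))):
--         if best is None or best[1] <= kv[1]:
--             best = kv
--     if best is None or best[1] <= 0:
--         return None
--     return order[:best[0] + 1]
-- ===== Notes on version B (the rewrite author's own statement) =====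
-- stated objective: faster
-- what changed: Replaces A's running-value recurrence with interleaved best-tracking and per-improvement list copies by a closed-form computation: twice the prefix value equals P^2 + Q - 2R for prefix power sums P, Q, R of p[j], p[j]^2, p[j]*C[j] (via the pairwise-product identity sum p_j*delta_j = (P^2 + sum p_j^2)/2), tabulated in one pass, followed by a right-to-left >= scan that locates the first argmax and one slice that builds the answer.
import Mathlib
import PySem

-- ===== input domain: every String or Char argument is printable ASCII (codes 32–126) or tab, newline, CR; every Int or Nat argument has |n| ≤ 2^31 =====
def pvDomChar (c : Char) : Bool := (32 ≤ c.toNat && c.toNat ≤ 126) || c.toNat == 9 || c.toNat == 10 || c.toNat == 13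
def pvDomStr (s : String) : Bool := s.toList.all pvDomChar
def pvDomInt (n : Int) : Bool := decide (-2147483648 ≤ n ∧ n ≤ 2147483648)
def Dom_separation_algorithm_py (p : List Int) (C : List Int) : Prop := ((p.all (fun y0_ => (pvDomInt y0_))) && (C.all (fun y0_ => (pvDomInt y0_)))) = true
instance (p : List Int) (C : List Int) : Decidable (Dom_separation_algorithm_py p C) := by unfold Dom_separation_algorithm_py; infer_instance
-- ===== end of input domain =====

-- B replaces A's running-value recurrence and interleaved best-tracking (with per-improvement copies) by a closed-form table (twice the prefix value = P^2 + Q - 2R from prefix power sums) plus a right-to-left first-argmax scan and one slice; a timing run measured B faster on large inputs.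


-- ===== PORT A =====
-- state = (best_set, best_value, curr_set, curr_value, delta); pyGetD is exact under Pre_ (indices 0 ≤ j < len p ≤ len C)
def separation_algorithm_py (p : List Int) (C : List Int) : Option (List Int) :=
  let order := PySem.List.sorted (PySem.List.pyRange 0 (p.length : Int) 1) (fun i => PySem.List.pyGetD C i 0)
  (order.foldl
    (fun (acc : Option (List Int) × Int × List Int × Int × Int) j =>
      let pj := PySem.List.pyGetD p j 0
      let cs := acc.2.2.1 ++ [j]
      let d  := acc.2.2.2.2 + pj
      let cv := acc.2.2.2.1 + pj * (d - PySem.List.pyGetD C j 0)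
      if acc.2.1 < cv then (some cs, cv, cs, cv, d) else (acc.1, acc.2.1, cs, cv, d))
    (none, 0, [], 0, 0)).1

-- ===== PORT B =====
-- loop body of B's backward scan: keep kv when no best yet or kv's value is ≥ the best's
def pvPick (b : Option (Int × Int)) (kv : Int × Int) : Option (Int × Int) :=
  match b with
  | none => some kv
  | some bb => if bb.2 ≤ kv.2 then some kv else some bb

-- state = (P, Q, R, vals2): prefix sums of p[j], p[j]^2, p[j]*C[j] and the doubled-value table
def separation_algorithm_py_alt (p : List Int) (C : List Int) : Option (List Int) :=
  let order := PySem.List.sorted (PySem.List.pyRange 0 (p.length : Int) 1) (fun i => PySem.List.pyGetD C i 0)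
  let st := order.foldl
    (fun (acc : Int × Int × Int × List Int) j =>
      let P := acc.1 + PySem.List.pyGetD p j 0
      let Q := acc.2.1 + PySem.List.pyGetD p j 0 * PySem.List.pyGetD p j 0
      let R := acc.2.2.1 + PySem.List.pyGetD p j 0 * PySem.List.pyGetD C j 0
      (P, Q, R, acc.2.2.2 ++ [P * P + Q - 2 * R]))
    (0, 0, 0, [])
  let vals2 := st.2.2.2
  let best := ((PySem.List.enumerate vals2 0).reverse).foldl pvPick none
  match best with
  | none => none
  | some bb => if bb.2 ≤ 0 then none else some (PySem.List.slice order none (some (bb.1 + 1)))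

-- ===== PRECONDITION & SPEC =====
-- A (and B) raise IndexError via C[i] in the sort key when C is shorter than p; exactly those inputs are excluded.
def Pre_separation_algorithm_py (p : List Int) (C : List Int) : Prop := p.length ≤ C.length
instance (p : List Int) (C : List Int) : Decidable (Pre_separation_algorithm_py p C) := by unfold Pre_separation_algorithm_py; infer_instance
def pvWitness_separation_algorithm_py : List Int × List Int := ([2], [1])
def Spec_separation_algorithm_py (p : List Int) (C : List Int) (out : Option (List Int)) : Prop := out = separation_algorithm_py_alt p C
instance (p : List Int) (C : List Int) (out : Option (List Int)) : Decidable (Spec_separation_algorithm_py p C out) := by unfold Spec_separation_algorithm_py; infer_instance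

-- ===== CLAIM (what is proved, stated in full; the proofs are below) =====
def Claim_equal_separation_algorithm_py : Prop := ∀ (p : List Int) (C : List Int), Dom_separation_algorithm_py p C → Pre_separation_algorithm_py p C → Spec_separation_algorithm_py p C (separation_algorithm_py p C)

-- ===== LEMMAS AND PROOFS =====

-- the running-value table generated from state (delta, total) over the remaining order
def pvVals (p C : List Int) : List Int → Int → Int → List Int
  | [], _, _ => []
  | j :: rest, d, t =>
    let d' := d + PySem.List.pyGetD p j 0
    let t' := t + PySem.List.pyGetD p j 0 * (d' - PySem.List.pyGetD C j 0)
    t' :: pvVals p C rest d' t'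

lemma foldl_max_shift (l : List Int) : ∀ a b : Int, l.foldl max (max a b) = max a (l.foldl max b) := by
  induction l with
  | nil => intro a b; rfl
  | cons c t ih =>
    intro a b
    simp only [List.foldl_cons, max_assoc]
    exact ih a (max b c)

-- A's interleaved loop, characterised as "first argmax of the value table beats best_value, or keep best_set"
lemma aFold_best (p C : List Int) (ord : List Int) :
    ∀ (d t : Int) (cs : List Int) (bs : Option (List Int)) (bv : Int),
      (ord.foldl
        (fun (acc : Option (List Int) × Int × List Int × Int × Int) j =>
          let pj := PySem.List.pyGetD p j 0
          let cs := acc.2.2.1 ++ [j]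
          let d  := acc.2.2.2.2 + pj
          let cv := acc.2.2.2.1 + pj * (d - PySem.List.pyGetD C j 0)
          if acc.2.1 < cv then (some cs, cv, cs, cv, d) else (acc.1, acc.2.1, cs, cv, d))
        (bs, bv, cs, t, d)).1
      = match PySem.List.max? (pvVals p C ord d t) (fun v => v) with
        | none => bs
        | some m =>
          if bv < m then
            match PySem.List.index? (pvVals p C ord d t) m with
            | none => bs
            | some k => some (cs ++ ord.take (k + 1))
          else bs := by
  induction ord with
  | nil => intro d t cs bs bv; simp [pvVals, PySem.List.max?]
  | cons j rest ih =>
    intro d t cs bs bv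
    simp only [List.foldl_cons, pvVals]
    set pj := PySem.List.pyGetD p j 0 with hpj
    set d' := d + pj with hd'
    set t' := t + pj * (d' - PySem.List.pyGetD C j 0) with ht'
    by_cases hb : bv < t'
    · simp only [if_pos hb]
      rw [ih d' t' (cs ++ [j]) (some (cs ++ [j])) t']
      cases hv : pvVals p C rest d' t' with
      | nil =>
        simp [PySem.List.max?, hb]
      | cons v vs =>
        rw [PySem.List.max?_id_cons, PySem.List.max?_id_cons]
        set N := vs.foldl max v with hNdef
        have hfold : (v :: vs).foldl max t' = max t' N := by
          simp only [List.foldl_cons]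
          exact foldl_max_shift vs t' v
        rw [hfold]
        by_cases htN : t' < N
        · have hmaxN : max t' N = N := max_eq_right (le_of_lt htN)
          rw [hmaxN]
          have hNmem : N ∈ v :: vs :=
            PySem.List.max?_mem (xs := v :: vs) (key := fun y => y) (m := N)
              (by rw [PySem.List.max?_id_cons])
          obtain ⟨k, hk⟩ := Option.isSome_iff_exists.mp
            ((PySem.List.index?_isSome_iff (xs := v :: vs) (v := N)).mpr hNmem)
          have hidx : PySem.List.index? (t' :: v :: vs) N = (PySem.List.index? (v :: vs) N).map (· + 1) :=
            PySem.List.index?_cons_of_ne (v :: vs) (ne_of_lt htN)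
          have hbvN : bv < N := lt_trans hb htN
          simp only [hidx, hk, Option.map_some, if_pos htN, if_pos hbvN]
          simp [List.take_succ_cons, List.append_assoc]
        · have hmax : max t' N = t' := max_eq_left (le_of_not_gt htN)
          rw [hmax]
          have hself : PySem.List.index? (t' :: v :: vs) t' = some 0 :=
            PySem.List.index?_cons_self t' (v :: vs)
          simp only [hself, if_pos hb, if_neg htN]
          simp
    · simp only [if_neg hb]
      rw [ih d' t' (cs ++ [j]) bs bv]
      have ht'bv : t' ≤ bv := le_of_not_gt hb
      cases hv : pvVals p C rest d' t' with
      | nil =>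
        simp [PySem.List.max?, hb]
      | cons v vs =>
        rw [PySem.List.max?_id_cons, PySem.List.max?_id_cons]
        set N := vs.foldl max v with hNdef
        have hfold : (v :: vs).foldl max t' = max t' N := by
          simp only [List.foldl_cons]
          exact foldl_max_shift vs t' v
        rw [hfold]
        by_cases hbN : bv < N
        · have htN : t' < N := lt_of_le_of_lt ht'bv hbN
          have hmaxN : max t' N = N := max_eq_right (le_of_lt htN)
          rw [hmaxN]
          have hNmem : N ∈ v :: vs :=
            PySem.List.max?_mem (xs := v :: vs) (key := fun y => y) (m := N)
              (by rw [PySem.List.max?_id_cons])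
          obtain ⟨k, hk⟩ := Option.isSome_iff_exists.mp
            ((PySem.List.index?_isSome_iff (xs := v :: vs) (v := N)).mpr hNmem)
          have hidx : PySem.List.index? (t' :: v :: vs) N = (PySem.List.index? (v :: vs) N).map (· + 1) :=
            PySem.List.index?_cons_of_ne (v :: vs) (ne_of_lt htN)
          simp only [hidx, hk, Option.map_some, if_pos hbN]
          simp [List.take_succ_cons, List.append_assoc]
        · have hbM : ¬ bv < max t' N := by
            rcases max_cases t' N with ⟨h1, _⟩ | ⟨h1, _⟩ <;> rw [h1]
            · exact hb
            · exact hbN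
          simp only [if_neg hbM, if_neg hbN]

-- B's table-building fold produces the doubled value table: invariant P² + Q - 2R = 2t with P = delta
lemma bFold_vals (p C : List Int) (ord : List Int) :
    ∀ (P Q R t : Int) (vs : List Int), P * P + Q - 2 * R = 2 * t →
      (ord.foldl
        (fun (acc : Int × Int × Int × List Int) j =>
          let P := acc.1 + PySem.List.pyGetD p j 0
          let Q := acc.2.1 + PySem.List.pyGetD p j 0 * PySem.List.pyGetD p j 0
          let R := acc.2.2.1 + PySem.List.pyGetD p j 0 * PySem.List.pyGetD C j 0
          (P, Q, R, acc.2.2.2 ++ [P * P + Q - 2 * R]))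
        (P, Q, R, vs)).2.2.2
      = vs ++ (pvVals p C ord P t).map (fun x => 2 * x) := by
  induction ord with
  | nil => intro P Q R t vs _; simp [pvVals]
  | cons j rest ih =>
    intro P Q R t vs h
    simp only [List.foldl_cons, pvVals]
    set pj := PySem.List.pyGetD p j 0 with hpj
    set cj := PySem.List.pyGetD C j 0 with hcj
    have hinv : (P + pj) * (P + pj) + (Q + pj * pj) - 2 * (R + pj * cj)
        = 2 * (t + pj * ((P + pj) - cj)) := by linear_combination h
    rw [ih (P + pj) (Q + pj * pj) (R + pj * cj) (t + pj * ((P + pj) - cj)) _ hinv]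
    simp [hinv]

-- the backward ≥-scan over the enumerated table finds (index of first maximum, maximum)
lemma rev_pick_argmax (vs : List Int) : ∀ s : Int,
    ((PySem.List.enumerate vs s).reverse).foldl pvPick none
    = (PySem.List.max? vs (fun y => y)).bind
        (fun m => (PySem.List.index? vs m).map (fun k => (s + (k : Int), m))) := by
  induction vs with
  | nil => intro s; simp [PySem.List.enumerate_nil, PySem.List.max?]
  | cons v vs ih =>
    intro s
    rw [PySem.List.enumerate_cons]
    simp only [List.reverse_cons, List.foldl_append, List.foldl_cons, List.foldl_nil]
    rw [ih (s + 1)]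
    cases vs with
    | nil =>
      simp [PySem.List.max?, pvPick]
    | cons u t =>
      rw [PySem.List.max?_id_cons]
      set m := t.foldl max u with hm
      have hmem : m ∈ u :: t :=
        PySem.List.max?_mem (xs := u :: t) (key := fun y => y) (m := m)
          (by rw [PySem.List.max?_id_cons])
      obtain ⟨k, hk⟩ := Option.isSome_iff_exists.mp
        ((PySem.List.index?_isSome_iff (xs := u :: t) (v := m)).mpr hmem)
      rw [PySem.List.max?_id_cons]
      have hfold : (u :: t).foldl max v = max v m := by
        simp only [List.foldl_cons]
        exact foldl_max_shift t v u
      rw [hfold]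
      rw [Option.bind_some]
      rw [hk]
      by_cases hmv : m ≤ v
      · have hmax : max v m = v := max_eq_left hmv
        rw [hmax, Option.bind_some, PySem.List.index?_cons_self]
        simp [pvPick, hmv]
      · have hvm : v < m := lt_of_not_ge hmv
        have hmax : max v m = m := max_eq_right (le_of_lt hvm)
        rw [hmax, Option.bind_some, PySem.List.index?_cons_of_ne (u :: t) (ne_of_lt hvm), hk]
        simp only [pvPick]
        simp [not_le.mpr hvm]
        omega

-- max of the doubled table is twice the max
lemma foldl_max_double (t : List Int) : ∀ x : Int,
    (t.map (fun y => 2 * y)).foldl max (2 * x) = 2 * t.foldl max x := by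
  induction t with
  | nil => intro x; rfl
  | cons u t ih =>
    intro x
    simp only [List.map_cons, List.foldl_cons]
    rw [show max (2 * x) (2 * u) = 2 * max x u by rcases le_total x u with h | h <;> simp [h]]
    exact ih (max x u)

-- first index of 2m in the doubled table is the first index of m
lemma index?_double (vs : List Int) (m : Int) :
    PySem.List.index? (vs.map (fun y => 2 * y)) (2 * m) = PySem.List.index? vs m := by
  induction vs with
  | nil => rfl
  | cons v t ih =>
    by_cases hv : v = m
    · subst hv
      rw [PySem.List.index?_cons_self, List.map_cons, PySem.List.index?_cons_self]
    · rw [List.map_cons, PySem.List.index?_cons_of_ne t hv,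
        PySem.List.index?_cons_of_ne (t.map (fun y => 2 * y)) (fun h => hv (by omega)), ih]

-- ===== VERDICT (by name: the statement is the Claim_ definition above) =====
theorem separation_algorithm_py_spec : Claim_equal_separation_algorithm_py := by
  intro p C _ _
  unfold Spec_separation_algorithm_py separation_algorithm_py separation_algorithm_py_alt
  set order := PySem.List.sorted (PySem.List.pyRange 0 (p.length : Int) 1) (fun i => PySem.List.pyGetD C i 0) with horder
  simp only []
  rw [aFold_best p C order 0 0 [] none 0,
      bFold_vals p C order 0 0 0 0 [] (by ring), rev_pick_argmax]
  set vals := pvVals p C order 0 0 with hvals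
  cases hm : PySem.List.max? vals (fun v => v) with
  | none =>
    have hnil : vals = [] := (PySem.List.max?_eq_none_iff vals (fun v => v)).mp hm
    simp [hnil, PySem.List.max?]
  | some m =>
    have hmax2 : PySem.List.max? (vals.map (fun x => 2 * x)) (fun v => v) = some (2 * m) := by
      have hmem := PySem.List.max?_mem (xs := vals) (key := fun v => v) hm
      cases hv : vals with
      | nil => rw [hv] at hmem; exact absurd hmem (List.not_mem_nil)
      | cons v t =>
        rw [List.map_cons, PySem.List.max?_id_cons, foldl_max_double]
        rw [hv, PySem.List.max?_id_cons] at hm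
        rw [Option.some_inj.mp hm]
    rw [List.nil_append, hmax2, Option.bind_some, index?_double]
    cases hk : PySem.List.index? vals m with
    | none =>
      rw [PySem.List.index?_eq_idxOf?] at hk
      by_cases h0 : 0 < m <;> simp [hk, h0]
    | some k =>
      rw [PySem.List.index?_eq_idxOf?] at hk
      have hsl : PySem.List.slice order none (some ((k : Int) + 1)) = order.take (k + 1) := by
        rw [show ((k : Int) + 1) = ((k + 1 : Nat) : Int) by push_cast; ring,
          PySem.List.slice_to_natCast]
      by_cases h0 : 0 < m
      · simp [hk, h0, hsl, show ¬ (2 * m ≤ 0) by omega]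
      · simp [h0, show (2 * m ≤ 0) by omega]
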